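-- pv_equiv track=rewrite | github.com/Ryaaad/Sequence_Alignment | Method_Progressive.py | NewSeqs
-- ===== SOURCE A (Python) =====
-- def NewSeqs(Path,Matrix):
--  Index=len(Path)-1
--  NewSeq1=[]
--  IndexSeq1=2
--  NewSeq2=[]
--  IndexSeq2=2
--  while Index>0 :
--   if(Path[Index]['j'] < Path[Index-1]['j'] and Path[Index]['i'] < Path[Index-1]['i']  ) :
--     NewSeq1.append(Matrix[0][IndexSeq1])
--     NewSeq2.append(Matrix[IndexSeq2][0])
--     IndexSeq1+=1
--     IndexSeq2+=1
--   else :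
--     if Path[Index]['j'] < Path[Index-1]['j'] :
--       NewSeq1.append(Matrix[0][IndexSeq1])
--       NewSeq2+='_'
--       IndexSeq1+=1
--
--     else :
--       NewSeq2.append(Matrix[IndexSeq2][0])
--       NewSeq1+='_'
--       IndexSeq2+=1
--
--   Index-=1
--  return NewSeq1 , NewSeq2
-- ===== SOURCE B (Python) =====
-- def NewSeqs(Path, Matrix):
--     n = len(Path)
--     # Pass 1: build NewSeq1 alone; it only depends on where j decreases.
--     NewSeq1 = []
--     c1 = 2
--     for k in range(n - 1, 0, -1):
--         if Path[k]['j'] < Path[k - 1]['j']: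
--             NewSeq1.append(Matrix[0][c1])
--             c1 += 1
--         else:
--             NewSeq1.append('_')
--     # Pass 2: build NewSeq2 alone; gap exactly when j decreases but i does not.
--     NewSeq2 = []
--     c2 = 2
--     for k in range(n - 1, 0, -1):
--         if Path[k]['j'] < Path[k - 1]['j'] and not Path[k]['i'] < Path[k - 1]['i']:
--             NewSeq2.append('_')
--         else:
--             NewSeq2.append(Matrix[c2][0])
--             c2 += 1
--     return NewSeq1, NewSeq2
-- ===== Notes on version B (the rewrite author's own statement) =====
-- stated objective: alternative
-- what changed: Builds NewSeq1 and NewSeq2 in two independent backward passes, each with its own counter, instead of one combined loop with coupled four-part state.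
import Mathlib
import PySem

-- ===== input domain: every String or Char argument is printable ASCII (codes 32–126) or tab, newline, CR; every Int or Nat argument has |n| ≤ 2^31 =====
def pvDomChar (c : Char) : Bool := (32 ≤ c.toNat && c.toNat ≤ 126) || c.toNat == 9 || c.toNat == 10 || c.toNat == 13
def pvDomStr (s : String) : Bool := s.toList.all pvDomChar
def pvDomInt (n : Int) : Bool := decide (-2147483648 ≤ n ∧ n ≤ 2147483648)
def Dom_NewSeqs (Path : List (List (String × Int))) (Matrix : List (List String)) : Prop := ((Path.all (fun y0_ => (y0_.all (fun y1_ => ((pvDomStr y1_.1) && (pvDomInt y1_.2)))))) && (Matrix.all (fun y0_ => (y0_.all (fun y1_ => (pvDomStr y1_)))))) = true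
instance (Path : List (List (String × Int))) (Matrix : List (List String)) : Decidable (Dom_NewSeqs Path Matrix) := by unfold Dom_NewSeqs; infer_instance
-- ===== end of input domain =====

-- B builds NewSeq1 and NewSeq2 in two independent backward passes (own counters) instead of A's single combined loop; objective: alternative decomposition, same cost.


-- ===== PORT A =====
-- shared access helpers (indices are always nonnegative in both programs;
-- Pre_NewSeqs guarantees every lookup hits, so the defaults are never returned inside Pre_)
-- d['j'] on an association-list dict: first match
def pvKey (e : List (String × Int)) (k : String) : Option Int := (e.find? (fun p => p.1 == k)).map (·.2)
def pvJ (e : List (String × Int)) : Int := (pvKey e "j").getD 0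
def pvI (e : List (String × Int)) : Int := (pvKey e "i").getD 0
-- Matrix[0][c] and Matrix[c][0]
def pvM0 (Matrix : List (List String)) (c : Nat) : String := (Matrix.getD 0 []).getD c ""
def pvMr (Matrix : List (List String)) (c : Nat) : String := (Matrix.getD c []).getD 0 ""

-- A's while loop: Index counts down, both sequences and both counters as one state
def NewSeqsLoop (Path : List (List (String × Int))) (Matrix : List (List String)) :
    Nat → Nat → Nat → List String × List String
  | 0, _, _ => ([], [])
  | n + 1, c1, c2 =>
    let cur := Path.getD (n + 1) []
    let prev := Path.getD n []
    if pvJ cur < pvJ prev ∧ pvI cur < pvI prev then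
      let r := NewSeqsLoop Path Matrix n (c1 + 1) (c2 + 1)
      (pvM0 Matrix c1 :: r.1, pvMr Matrix c2 :: r.2)
    else if pvJ cur < pvJ prev then
      let r := NewSeqsLoop Path Matrix n (c1 + 1) c2
      (pvM0 Matrix c1 :: r.1, "_" :: r.2)
    else
      let r := NewSeqsLoop Path Matrix n c1 (c2 + 1)
      ("_" :: r.1, pvMr Matrix c2 :: r.2)

def NewSeqs (Path : List (List (String × Int))) (Matrix : List (List String)) : List String × List String :=
  NewSeqsLoop Path Matrix (Path.length - 1) 2 2

-- ===== PORT B =====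
-- pass 1: NewSeq1 alone, only looks at 'j'
def NewSeqsPass1 (Path : List (List (String × Int))) (Matrix : List (List String)) :
    Nat → Nat → List String
  | 0, _ => []
  | n + 1, c1 =>
    if pvJ (Path.getD (n + 1) []) < pvJ (Path.getD n []) then
      pvM0 Matrix c1 :: NewSeqsPass1 Path Matrix n (c1 + 1)
    else
      "_" :: NewSeqsPass1 Path Matrix n c1

-- pass 2: NewSeq2 alone, gap exactly when j decreases but i does not
def NewSeqsPass2 (Path : List (List (String × Int))) (Matrix : List (List String)) :
    Nat → Nat → List String
  | 0, _ => []
  | n + 1, c2 =>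
    if pvJ (Path.getD (n + 1) []) < pvJ (Path.getD n []) ∧
       ¬ pvI (Path.getD (n + 1) []) < pvI (Path.getD n []) then
      "_" :: NewSeqsPass2 Path Matrix n c2
    else
      pvMr Matrix c2 :: NewSeqsPass2 Path Matrix n (c2 + 1)

def NewSeqs_alt (Path : List (List (String × Int))) (Matrix : List (List String)) : List String × List String :=
  (NewSeqsPass1 Path Matrix (Path.length - 1) 2, NewSeqsPass2 Path Matrix (Path.length - 1) 2)

-- ===== PRECONDITION & SPEC =====
-- number of adjacent steps where j decreases (column consumed → Matrix[0][2..nJ+1] read)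
def pvNJ (Path : List (List (String × Int))) : Nat :=
  (Path.zip Path.tail).countP (fun p => decide (pvJ p.2 < pvJ p.1))
-- number of adjacent steps where NOT (j decreases and i does not) (row consumed → Matrix[2..nI+1][0] read)
def pvNI (Path : List (List (String × Int))) : Nat :=
  (Path.zip Path.tail).countP (fun p => decide (¬ (pvJ p.2 < pvJ p.1 ∧ ¬ pvI p.2 < pvI p.1)))

-- Exactly the inputs on which A returns: every 'j' (and, where j decreases, 'i') key the loop
-- reads exists, and every Matrix cell the loop reads exists; elsewhere A raises KeyError/IndexError.
def pvPreB (Path : List (List (String × Int))) (Matrix : List (List String)) : Bool :=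
  ((Path.zip Path.tail).all (fun p =>
      (pvKey p.2 "j").isSome && (pvKey p.1 "j").isSome &&
      (!(decide (pvJ p.2 < pvJ p.1)) || ((pvKey p.2 "i").isSome && (pvKey p.1 "i").isSome)))) &&
  (pvNJ Path == 0 || (decide (1 ≤ Matrix.length) && decide (pvNJ Path + 2 ≤ (Matrix.getD 0 []).length))) &&
  (pvNI Path == 0 || (decide (pvNI Path + 2 ≤ Matrix.length) &&
      (List.range (pvNI Path)).all (fun c => decide (1 ≤ (Matrix.getD (c + 2) []).length))))

def Pre_NewSeqs (Path : List (List (String × Int))) (Matrix : List (List String)) : Prop :=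
  pvPreB Path Matrix = true

instance (Path : List (List (String × Int))) (Matrix : List (List String)) : Decidable (Pre_NewSeqs Path Matrix) := by
  unfold Pre_NewSeqs; infer_instance

def pvWitness_NewSeqs : (List (List (String × Int))) × List (List String) :=
  ([[("i", 1), ("j", 1)], [("i", 0), ("j", 0)]], [["a", "b", "c"], ["x"], ["y"]])

def Spec_NewSeqs (Path : List (List (String × Int))) (Matrix : List (List String)) (out : List String × List String) : Prop := out = NewSeqs_alt Path Matrix
instance (Path : List (List (String × Int))) (Matrix : List (List String)) (out : List String × List String) : Decidable (Spec_NewSeqs Path Matrix out) := by unfold Spec_NewSeqs; infer_instance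

-- ===== CLAIM (what is proved, stated in full; the proofs are below) =====
def Claim_equal_NewSeqs : Prop := ∀ (Path : List (List (String × Int))) (Matrix : List (List String)), Dom_NewSeqs Path Matrix → Pre_NewSeqs Path Matrix → Spec_NewSeqs Path Matrix (NewSeqs Path Matrix)

-- ===== LEMMAS AND PROOFS =====
theorem NewSeqsLoop_eq (Path : List (List (String × Int))) (Matrix : List (List String)) :
    ∀ (n c1 c2 : Nat),
      NewSeqsLoop Path Matrix n c1 c2 =
        (NewSeqsPass1 Path Matrix n c1, NewSeqsPass2 Path Matrix n c2) := by
  intro n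
  induction n with
  | zero => intro c1 c2; simp [NewSeqsLoop, NewSeqsPass1, NewSeqsPass2]
  | succ n ih =>
    intro c1 c2
    simp only [NewSeqsLoop, NewSeqsPass1, NewSeqsPass2, ih]
    split_ifs <;> simp_all <;> omega

-- ===== VERDICT (by name: the statement is the Claim_ definition above) =====
theorem NewSeqs_spec : Claim_equal_NewSeqs := by
  intro Path Matrix _ _
  unfold Spec_NewSeqs NewSeqs NewSeqs_alt
  exact NewSeqsLoop_eq Path Matrix _ 2 2
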